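-- pv_equiv track=rewrite | github.com/MattFisher/hangman-bench | analysis/zen_hangman.py | best_move_for
-- ===== SOURCE A (Python) =====
-- from typing import List, Tuple
--
-- ALPHABET = [chr(c) for c in range(ord("a"), ord("z") + 1)]
--
-- def best_move_for(
--     board: str, wrong_guesses: List[str], dictionary: List[str]
-- ) -> str | None:
--     letters_already_found = {c for c in board if c != "."}
--     excluded = letters_already_found.union(wrong_guesses)
--     counts = {c: 0 for c in ALPHABET if c not in excluded}
--
--     if not counts:
--         return None
--
--     for word in dictionary:
--         for ch in word:
--             if ch in counts:
--                 counts[ch] += 1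
--
--     # Pick the letter with the greatest count; break ties alphabetically
--     # by selecting the smallest letter among those with max count.
--     max_count = max(counts.values(), default=0)
--     if max_count <= 0:
--         return None
--     candidates = [ch for ch, cnt in counts.items() if cnt == max_count]
--     return min(candidates) if candidates else None
-- ===== SOURCE B (Python) =====
-- def best_move_for(board, wrong_guesses, dictionary):
--     # Letter-major scan: for each allowed letter (alphabetical order) total its
--     # occurrences with str.count; keep the first strict maximum, so ties go to
--     # the alphabetically smallest letter; never updating (count 0 everywhere,
--     # or no allowed letter) leaves None.
--     excluded = {c for c in board if c != "."}.union(wrong_guesses)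
--     best_letter = None
--     best_count = 0
--     for code in range(ord("a"), ord("z") + 1):
--         ch = chr(code)
--         if ch in excluded:
--             continue
--         cnt = sum(word.count(ch) for word in dictionary)
--         if cnt > best_count:
--             best_letter, best_count = ch, cnt
--     return best_letter
-- ===== Notes on version B (the rewrite author's own statement) =====
-- stated objective: alternative
-- what changed: A makes one word-major pass incrementing a per-letter dict and then selects via max over values, filter, and min over tied letters; B scans letter-major, computing each allowed letter's total with str.count per word and keeping the first strict maximum so the alphabetically smallest tied letter wins, with no dict and no post-selection passes.
import Mathlib
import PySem

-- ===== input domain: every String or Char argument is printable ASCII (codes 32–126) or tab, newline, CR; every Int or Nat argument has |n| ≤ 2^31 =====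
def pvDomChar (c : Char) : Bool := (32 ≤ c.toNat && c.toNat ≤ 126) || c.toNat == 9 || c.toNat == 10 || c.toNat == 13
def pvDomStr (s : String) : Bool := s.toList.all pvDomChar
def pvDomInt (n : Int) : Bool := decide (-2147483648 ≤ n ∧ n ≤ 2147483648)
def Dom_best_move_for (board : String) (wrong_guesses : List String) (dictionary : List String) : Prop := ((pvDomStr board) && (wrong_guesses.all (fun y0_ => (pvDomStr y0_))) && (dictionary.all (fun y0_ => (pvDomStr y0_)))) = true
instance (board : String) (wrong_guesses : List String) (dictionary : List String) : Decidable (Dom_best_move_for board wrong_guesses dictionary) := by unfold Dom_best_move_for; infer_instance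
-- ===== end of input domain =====

-- B replaces A's word-major dict-counting pass and max/filter/min selection by a
-- letter-major scan: one total-frequency sum per allowed letter, keeping the first
-- strict maximum (objective: alternative decomposition).

-- ===== PORT A =====
-- ALPHABET = [chr(c) for c in range(ord("a"), ord("z") + 1)]
def pyALPHABET : List String :=
  (PySem.List.pyRange 97 123 1).map (fun c => String.ofList [Char.ofNat c.toNat])

def best_move_for (board : String) (wrong_guesses : List String) (dictionary : List String) : Option String :=
  let letters_already_found : PySem.Set String :=
    PySem.Set.ofList ((board.toList.filter (fun c => c ≠ '.')).map (fun c => String.ofList [c]))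
  let excluded : PySem.Set String := PySem.Set.union letters_already_found wrong_guesses
  let counts : PySem.Dict String Int :=
    PySem.Dict.ofList ((pyALPHABET.filter (fun c => !(PySem.Set.contains excluded c))).map (fun c => (c, (0 : Int))))
  if counts.size = 0 then none
  else
    let counts := dictionary.foldl (fun d word =>
      word.toList.foldl (fun d ch =>
        if d.contains (String.ofList [ch]) then d.modify (String.ofList [ch]) 0 (· + 1) else d) d) counts
    let max_count : Int := PySem.List.maxD counts.values (fun x => x) 0
    if max_count ≤ 0 then none
    else
      let candidates : List String := (counts.items.filter (fun p => p.2 == max_count)).map (fun p => p.1)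
      if candidates.isEmpty then none else PySem.List.min? candidates (fun x => x)

-- ===== PORT B =====
def best_move_for_alt (board : String) (wrong_guesses : List String) (dictionary : List String) : Option String :=
  let excluded : PySem.Set String :=
    PySem.Set.union
      (PySem.Set.ofList ((board.toList.filter (fun c => c ≠ '.')).map (fun c => String.ofList [c])))
      wrong_guesses
  let r : Option String × Int := (PySem.List.pyRange 97 123 1).foldl (fun st code =>
      let ch := String.ofList [Char.ofNat code.toNat]
      if PySem.Set.contains excluded ch then st
      else
        let cnt : Int := (dictionary.map (fun word => (PySem.Str.count word ch : Int))).sum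
        if st.2 < cnt then (some ch, cnt) else st) (none, (0 : Int))
  r.1

-- ===== PRECONDITION & SPEC =====
def Spec_best_move_for (board : String) (wrong_guesses : List String) (dictionary : List String) (out : Option String) : Prop := out = best_move_for_alt board wrong_guesses dictionary
instance (board : String) (wrong_guesses : List String) (dictionary : List String) (out : Option String) : Decidable (Spec_best_move_for board wrong_guesses dictionary out) := by unfold Spec_best_move_for; infer_instance

-- ===== CLAIM (what is proved, stated in full; the proofs are below) =====
def Claim_equal_best_move_for : Prop := ∀ (board : String) (wrong_guesses : List String) (dictionary : List String), Dom_best_move_for board wrong_guesses dictionary → Spec_best_move_for board wrong_guesses dictionary (best_move_for board wrong_guesses dictionary)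

-- ===== LEMMAS AND PROOFS =====

-- single-char string
def mkS (c : Char) : String := String.ofList [c]

def alphaChars : List Char :=
  ['a','b','c','d','e','f','g','h','i','j','k','l','m','n','o','p','q','r','s','t','u','v','w','x','y','z']

-- total occurrences of letter c across the dictionary
def cntf (dictionary : List String) (c : Char) : Int :=
  (dictionary.map (fun w => (w.toList.count c : Int))).sum

lemma mkS_inj {c d : Char} (h : mkS c = mkS d) : c = d := by
  have := congrArg String.toList h
  simpa [mkS] using this

lemma mkS_lt {c d : Char} (h : c < d) : mkS c < mkS d := by
  simp only [mkS]
  rw [String.lt_iff_toList_lt]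
  simpa using List.Lex.rel h

lemma cntf_nonneg (dictionary : List String) (c : Char) : 0 ≤ cntf dictionary c := by
  apply List.sum_nonneg
  intro x hx
  simp only [List.mem_map] at hx
  obtain ⟨w, _, rfl⟩ := hx
  positivity

lemma count_go_single (c : Char) (n : Nat) : ∀ (l : List Char) (acc : Nat), l.length ≤ n →
    PySem.Chars.count.go [c] n l acc = acc + l.count c := by
  induction n with
  | zero =>
    intro l acc h
    have : l = [] := List.eq_nil_of_length_eq_zero (Nat.le_zero.1 h)
    subst this
    simp [PySem.Chars.count.go]
  | succ n ih =>
    intro l acc h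
    cases l with
    | nil => simp [PySem.Chars.count.go]
    | cons a t =>
      have ht : t.length ≤ n := by simpa using h
      by_cases hca : c = a
      · subst hca
        have hpre : ([c].isPrefixOf (c :: t)) = true := by simp [List.isPrefixOf]
        simp only [PySem.Chars.count.go, hpre, if_pos, List.length_cons, List.length_nil]
        rw [show List.drop (0 + 1) (c :: t) = t by simp]
        rw [ih t (acc + 1) ht]
        simp
        omega
      · have hpre : ([c].isPrefixOf (a :: t)) = false := by
          simp [List.isPrefixOf]
          exact hca
        simp only [PySem.Chars.count.go, hpre, Bool.false_eq_true, if_false]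
        rw [ih t acc ht]
        simp [List.count_cons]
        exact fun h' => hca h'.symm

lemma count_single (w : String) (c : Char) :
    (PySem.Str.count w (mkS c) : Int) = (w.toList.count c : Int) := by
  have h1 : (mkS c).toList = [c] := by simp [mkS]
  simp only [PySem.Str.count, PySem.Chars.count, h1]
  rw [count_go_single c w.toList.length w.toList 0 (le_refl _)]
  simp

lemma pyALPHABET_eq : pyALPHABET = alphaChars.map mkS := by decide

lemma alphaChars_nodup : alphaChars.Nodup := by decide

lemma alphaChars_sorted : alphaChars.Pairwise (· < ·) := by decide

-- ---- A side: the counting loop on a dict of shape LC.map (fun c => (mkS c, g c)) ----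

lemma dict_contains_mk (LC : List Char) (g : Char → Int) (a : Char) :
    (PySem.Dict.mk (LC.map (fun c => (mkS c, g c)))).contains (mkS a) = decide (a ∈ LC) := by
  simp only [PySem.Dict.contains, List.any_map]
  rcases Decidable.em (a ∈ LC) with h | h
  · simp only [h, decide_true]
    apply List.any_eq_true.2
    exact ⟨a, h, by simp⟩
  · simp only [h, decide_false]
    apply List.any_eq_false.2
    intro c hc
    simp only [Function.comp, beq_iff_eq]
    intro hEq
    exact h (mkS_inj hEq ▸ hc)

lemma dict_getD_mk (LC : List Char) (g : Char → Int) (a : Char) (ha : a ∈ LC) :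
    (PySem.Dict.mk (LC.map (fun c => (mkS c, g c)))).getD (mkS a) 0 = g a := by
  induction LC with
  | nil => cases ha
  | cons c t ih =>
    rcases Decidable.em (c = a) with rfl | hne
    · simp [PySem.Dict.getD, PySem.Dict.get?]
    · have ha' : a ∈ t := by
        rcases List.mem_cons.1 ha with rfl | h
        · exact absurd rfl hne
        · exact h
      have hne' : (mkS c == mkS a) = false := by
        simp only [beq_eq_false_iff_ne, ne_eq]
        intro h; exact hne (mkS_inj h)
      simpa [PySem.Dict.getD, PySem.Dict.get?, hne'] using ih ha'

lemma dict_modify_mk (LC : List Char) (g : Char → Int) (a : Char) (ha : a ∈ LC) :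
    (PySem.Dict.mk (LC.map (fun c => (mkS c, g c)))).modify (mkS a) 0 (· + 1)
      = PySem.Dict.mk (LC.map (fun c => (mkS c, if c = a then g c + 1 else g c))) := by
  have hc : (PySem.Dict.mk (LC.map (fun c => (mkS c, g c)))).contains (mkS a) = true := by
    rw [dict_contains_mk]; simpa using ha
  have hg := dict_getD_mk LC g a ha
  simp only [PySem.Dict.modify, PySem.Dict.insert, hc, if_pos, hg]
  congr 1
  simp only [List.map_map]
  apply List.map_congr_left
  intro c _
  rcases Decidable.em (c = a) with rfl | hne
  · simp
  · have hne' : (mkS c == mkS a) = false := by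
      simp only [beq_eq_false_iff_ne, ne_eq]
      intro h; exact hne (mkS_inj h)
    simp [Function.comp, hne', hne]

lemma word_loop (LC : List Char) (w : List Char) (g : Char → Int) :
    w.foldl (fun d ch =>
        if d.contains (String.ofList [ch]) then d.modify (String.ofList [ch]) 0 (· + 1) else d)
      (PySem.Dict.mk (LC.map (fun c => (mkS c, g c))))
    = PySem.Dict.mk (LC.map (fun c => (mkS c, g c + (w.count c : Int)))) := by
  induction w generalizing g with
  | nil => simp
  | cons a t ih =>
    simp only [List.foldl_cons]
    rcases Decidable.em (a ∈ LC) with ha | ha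
    · have hc : (PySem.Dict.mk (LC.map (fun c => (mkS c, g c)))).contains (mkS a) = true := by
        rw [dict_contains_mk]; simpa using ha
      rw [show String.ofList [a] = mkS a from rfl, hc, if_pos rfl]
      rw [dict_modify_mk LC g a ha, ih]
      congr 1
      apply List.map_congr_left
      intro c _
      rcases Decidable.em (c = a) with rfl | hne
      · simp
        omega
      · simp [hne, Ne.symm hne]
    · have hc : (PySem.Dict.mk (LC.map (fun c => (mkS c, g c)))).contains (mkS a) = false := by
        rw [dict_contains_mk]; simpa using ha
      rw [show String.ofList [a] = mkS a from rfl, hc, if_neg (by simp)]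
      rw [ih]
      congr 1
      apply List.map_congr_left
      intro c hcLC
      have hne : a ≠ c := fun h => ha (h ▸ hcLC)
      simp [hne]

lemma dict_loop (LC : List Char) (dictionary : List String) (g : Char → Int) :
    dictionary.foldl (fun d word =>
        word.toList.foldl (fun d ch =>
          if d.contains (String.ofList [ch]) then d.modify (String.ofList [ch]) 0 (· + 1) else d) d)
      (PySem.Dict.mk (LC.map (fun c => (mkS c, g c))))
    = PySem.Dict.mk (LC.map (fun c => (mkS c, g c + cntf dictionary c))) := by
  induction dictionary generalizing g with
  | nil => simp [cntf]
  | cons w ws ih =>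
    simp only [List.foldl_cons]
    rw [word_loop, ih]
    congr 1
    apply List.map_congr_left
    intro c _
    simp [cntf, add_assoc]

-- Dict.ofList of a nodup-key pair list is the literal dict
lemma ofList_eq_mk (ps : List (String × Int)) (h : (ps.map Prod.fst).Nodup) :
    PySem.Dict.ofList ps = PySem.Dict.mk ps := by
  induction ps using List.reverseRecOn with
  | nil => rfl
  | append_singleton qs p ih =>
    have hq : (qs.map Prod.fst).Nodup := by
      rw [List.map_append] at h
      exact (List.nodup_append.1 h).1
    have hnotin : p.1 ∉ qs.map Prod.fst := by
      rw [List.map_append] at h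
      intro hmem
      have h3 := (List.nodup_append.1 h).2.2
      exact h3 p.1 hmem p.1 (by simp) rfl
    have hstep : PySem.Dict.ofList (qs ++ [p]) = (PySem.Dict.ofList qs).insert p.1 p.2 := by
      simp [PySem.Dict.ofList, PySem.Dict.update, List.foldl_append]
    rw [hstep, ih hq]
    have hcon : (PySem.Dict.mk qs).contains p.1 = false := by
      simp only [PySem.Dict.contains]
      apply List.any_eq_false.2
      intro q hqmem
      simp only [beq_iff_eq]
      intro hEq
      exact hnotin (hEq ▸ List.mem_map_of_mem hqmem)
    simp [PySem.Dict.insert, hcon]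

-- ---- B side: characterisation of the strict-improvement fold ----

lemma bfold_char (excl : String → Bool) (f : Char → Int) (hf : ∀ c, 0 ≤ f c) (AC : List Char) :
    AC.foldl (fun st c =>
        if excl (mkS c) then st
        else if st.2 < f c then (some (mkS c), f c) else st) ((none : Option String), (0 : Int))
    = (if 0 < (PySem.List.max? ((AC.filter (fun c => !(excl (mkS c)))).map f) (fun y => y)).getD 0
       then ((AC.filter (fun c => !(excl (mkS c)))).find? (fun c =>
              f c == (PySem.List.max? ((AC.filter (fun c => !(excl (mkS c)))).map f) (fun y => y)).getD 0)).map mkS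
       else none,
       (PySem.List.max? ((AC.filter (fun c => !(excl (mkS c)))).map f) (fun y => y)).getD 0) := by
  induction AC using List.reverseRecOn with
  | nil => simp [PySem.List.max?]
  | append_singleton AC a ih =>
    rw [List.foldl_append, ih, List.foldl_cons, List.foldl_nil]
    by_cases hx : excl (mkS a)
    · simp [List.filter_append, hx]
    · have hLC : (AC ++ [a]).filter (fun c => !(excl (mkS c)))
          = AC.filter (fun c => !(excl (mkS c))) ++ [a] := by
        simp [List.filter_append, hx]
      rw [hLC]
      set LC := AC.filter (fun c => !(excl (mkS c))) with hLCdef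
      cases h0 : PySem.List.max? (LC.map f) (fun y => y) with
      | none =>
        have hnil : LC.map f = [] := (PySem.List.max?_eq_none_iff _ _).1 h0
        have hLCnil : LC = [] := List.map_eq_nil_iff.1 hnil
        rw [hLCnil]
        have hmaxa : PySem.List.max? (([] : List Char).map f ++ [f a]) (fun y => y) = some (f a) := by
          simp [PySem.List.max?]
        by_cases hfa : 0 < f a
        · simp [hfa, hx, PySem.List.max?]
        · have hfa0 : f a = 0 := le_antisymm (not_lt.1 hfa) (hf a)
          simp [hfa0, hx, PySem.List.max?]
      | some m0 =>
        have hm0mem : m0 ∈ LC.map f := PySem.List.max?_mem h0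
        have hm0max : ∀ y ∈ LC.map f, y ≤ m0 := by
          intro y hy
          exact PySem.List.max?_isMax (key := fun y => y) h0 y hy
        have hm0nonneg : 0 ≤ m0 := by
          obtain ⟨c0, _, rfl⟩ := List.mem_map.1 hm0mem
          exact hf c0
        have hmaxapp : PySem.List.max? (LC.map f ++ [f a]) (fun y => y)
            = if m0 < f a then some (f a) else some m0 := by
          simp only [PySem.List.max?] at h0 ⊢
          rw [List.foldl_append, h0]
          simp
        by_cases hlt : m0 < f a
        · -- new strict maximum at a
          have hfa_pos : 0 < f a := lt_of_le_of_lt hm0nonneg hlt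
          have hfind : LC.find? (fun c => f c == f a) = none := by
            apply List.find?_eq_none.2
            intro c hc
            simp only [beq_iff_eq]
            exact fun hEq => absurd (hEq ▸ hm0max (f c) (List.mem_map_of_mem hc)) (not_le.2 hlt)
          simp only [List.map_append, List.map_cons, List.map_nil]
          rw [hmaxapp]
          simp [hx, hlt, hfa_pos, List.find?_append, hfind]
        · -- old maximum stands
          have hfale : f a ≤ m0 := not_lt.1 hlt
          simp only [List.map_append, List.map_cons, List.map_nil]
          rw [hmaxapp]
          by_cases hm0pos : 0 < m0
          · obtain ⟨c0, hc0mem, hc0⟩ := List.mem_map.1 hm0mem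
            have hfindsome : (LC.find? (fun c => f c == m0)).isSome := by
              rw [List.find?_isSome]
              exact ⟨c0, hc0mem, by simp [hc0]⟩
            obtain ⟨r, hr⟩ := Option.isSome_iff_exists.1 hfindsome
            simp [hx, hlt, hm0pos, List.find?_append, hr]
          · simp [hx, hlt, hm0pos]

lemma foldl_min_eq (x : String) (t : List String) (h : ∀ y ∈ t, x ≤ y) : t.foldl min x = x := by
  induction t with
  | nil => rfl
  | cons y t ih =>
    simp only [List.foldl_cons]
    rw [min_eq_left (h y (by simp))]
    exact ih (fun z hz => h z (by simp [hz]))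

lemma min?_head_of_sorted (l : List String) (h : l.Pairwise (· < ·)) :
    PySem.List.min? l (fun y => y) = l.head? := by
  cases l with
  | nil => rfl
  | cons x t =>
    rw [PySem.List.min?_id_cons]
    have h' := List.pairwise_cons.1 h
    rw [foldl_min_eq x t (fun y hy => le_of_lt (h'.1 y hy))]
    rfl

lemma main_eq (board : String) (wrong_guesses : List String) (dictionary : List String) :
    best_move_for board wrong_guesses dictionary = best_move_for_alt board wrong_guesses dictionary := by
  unfold best_move_for best_move_for_alt
  dsimp only
  set E : PySem.Set String := PySem.Set.union
      (PySem.Set.ofList ((board.toList.filter (fun c => c ≠ '.')).map (fun c => String.ofList [c])))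
      wrong_guesses with hE
  -- B side: fold over codes = the characterised fold over alphaChars
  have hrange : PySem.List.pyRange 97 123 1 = alphaChars.map (fun c => (c.toNat : Int)) := by decide
  rw [hrange, List.foldl_map]
  have hstep : (fun (st : Option String × Int) (c : Char) =>
        let ch := String.ofList [Char.ofNat ((c.toNat : Int)).toNat]
        if PySem.Set.contains E ch then st
        else
          let cnt : Int := (dictionary.map (fun word => (PySem.Str.count word ch : Int))).sum
          if st.2 < cnt then (some ch, cnt) else st)
      = (fun (st : Option String × Int) (c : Char) =>
          if PySem.Set.contains E (mkS c) then st
          else if st.2 < cntf dictionary c then (some (mkS c), cntf dictionary c) else st) := by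
    funext st c
    simp only [Int.toNat_natCast, Char.ofNat_toNat]
    rw [show String.ofList [c] = mkS c from rfl]
    simp only [count_single, cntf]
  rw [hstep, bfold_char (fun s => PySem.Set.contains E s) (cntf dictionary) (cntf_nonneg dictionary) alphaChars]
  -- A side: the initial dict
  rw [pyALPHABET_eq, List.filter_map, List.map_map]
  set LC : List Char := alphaChars.filter (fun c => !PySem.Set.contains E (mkS c)) with hLCdef
  have hcomp : alphaChars.filter ((fun c => !PySem.Set.contains E c) ∘ mkS) = LC := by
    rw [hLCdef]; rfl
  rw [hcomp]
  have hpairs : ((fun c => (c, (0:Int))) ∘ mkS) = (fun c => (mkS c, (0:Int))) := rfl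
  rw [hpairs]
  have hnodupLC : LC.Nodup := List.Nodup.filter _ alphaChars_nodup
  have hnodupkeys : ((LC.map (fun c => (mkS c, (0:Int)))).map Prod.fst).Nodup := by
    rw [List.map_map]
    exact List.Nodup.map (fun a b h => mkS_inj h) hnodupLC
  rw [ofList_eq_mk _ hnodupkeys]
  have hsize : (PySem.Dict.mk (LC.map (fun c => (mkS c, (0:Int))))).size = LC.length := by
    simp [PySem.Dict.size]
  rw [hsize]
  have hLCsorted : LC.Pairwise (· < ·) := List.Pairwise.filter _ alphaChars_sorted
  by_cases hLC : LC = []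
  · rw [hLC]
    simp [PySem.List.max?]
  · rw [if_neg (by simpa using fun h => hLC (List.eq_nil_of_length_eq_zero h))]
    rw [dict_loop LC dictionary (fun _ => 0)]
    have hzero : (fun c => (mkS c, (0:Int) + cntf dictionary c)) = (fun c => (mkS c, cntf dictionary c)) := by
      funext c; simp
    rw [hzero]
    have hvalues : (PySem.Dict.mk (LC.map (fun c => (mkS c, cntf dictionary c)))).values
        = LC.map (cntf dictionary) := by
      simp [PySem.Dict.values]
    rw [show PySem.List.maxD (PySem.Dict.mk (LC.map (fun c => (mkS c, cntf dictionary c)))).values (fun x => x) 0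
        = (PySem.List.max? (LC.map (cntf dictionary)) (fun y => y)).getD 0 by rw [PySem.List.maxD, hvalues]]
    cases hm : PySem.List.max? (LC.map (cntf dictionary)) (fun y => y) with
    | none =>
      exact absurd (List.map_eq_nil_iff.1 ((PySem.List.max?_eq_none_iff _ _).1 hm)) hLC
    | some m0 =>
      have hm0mem : m0 ∈ LC.map (cntf dictionary) := PySem.List.max?_mem hm
      obtain ⟨c0, hc0mem, hc0⟩ := List.mem_map.1 hm0mem
      simp only [Option.getD_some]
      by_cases hpos : m0 ≤ 0
      · rw [if_pos hpos, if_neg (not_lt.2 hpos)]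
      · rw [if_neg hpos, if_pos (not_le.1 hpos)]
        -- candidates
        rw [List.filter_map, List.map_map]
        have hcand : ((fun (p : String × Int) => p.2 == m0) ∘ (fun c => (mkS c, cntf dictionary c)))
            = (fun c => cntf dictionary c == m0) := rfl
        have hfst : ((fun (p : String × Int) => p.1) ∘ (fun c => (mkS c, cntf dictionary c))) = mkS := rfl
        rw [hcand, hfst]
        set cands := (LC.filter (fun c => cntf dictionary c == m0)).map mkS with hcandsdef
        have hc0in : c0 ∈ LC.filter (fun c => cntf dictionary c == m0) :=
          List.mem_filter.2 ⟨hc0mem, by simp [hc0]⟩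
        have hne : cands ≠ [] := by
          intro h
          rw [hcandsdef] at h
          exact absurd (List.mem_map_of_mem (f := mkS) hc0in) (by simp [h])
        rw [if_neg (by simpa [List.isEmpty_iff] using hne)]
        have hsorted : cands.Pairwise (· < ·) := by
          rw [hcandsdef]
          exact List.Pairwise.map mkS (fun a b h => mkS_lt h) (List.Pairwise.filter _ hLCsorted)
        rw [min?_head_of_sorted cands hsorted, hcandsdef, List.head?_map, List.head?_filter]

-- ===== VERDICT (by name: the statement is the Claim_ definition above) =====
theorem best_move_for_spec : Claim_equal_best_move_for := by
  intro board wrong_guesses dictionary _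
  exact main_eq board wrong_guesses dictionary
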